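-- pv_equiv track=rewrite | github.com/csmcal/wf2wf | wf2wf/importers/wdl.py | _convert_wdl_type
-- ===== SOURCE A (Python) =====
-- def _convert_wdl_type(wdl_type: str) -> str:
--     """Convert WDL type to IR type."""
--     type_mapping = {
--         "String": "string",
--         "Int": "int",
--         "Float": "float",
--         "Boolean": "boolean",
--         "File": "File",
--         "Array": "array",
--         "Map": "record",
--         "Object": "record",
--     }
--
--     # Handle array types
--     if wdl_type.startswith("Array[") and wdl_type.endswith("]"):
--         inner_type = wdl_type[6:-1]
--         return f"array<{_convert_wdl_type(inner_type)}>"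
--
--     # Handle optional types
--     if wdl_type.endswith("?"):
--         base_type = wdl_type[:-1]
--         return _convert_wdl_type(base_type)
--
--     return type_mapping.get(wdl_type, "string")
-- ===== SOURCE B (Python) =====
-- def _convert_wdl_type(wdl_type: str) -> str:
--     """Convert WDL type to IR type (count Array nesting depth, then one lookup)."""
--     type_mapping = {
--         "String": "string",
--         "Int": "int",
--         "Float": "float",
--         "Boolean": "boolean",
--         "File": "File",
--         "Array": "array",
--         "Map": "record",
--         "Object": "record",
--     }
--     depth = 0
--     cur = wdl_type.rstrip("?")
--     while cur.startswith("Array[") and cur.endswith("]"):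
--         depth += 1
--         cur = cur[6:-1].rstrip("?")
--     return "array<" * depth + type_mapping.get(cur, "string") + ">" * depth
-- ===== Notes on version B (the rewrite author's own statement) =====
-- stated objective: alternative
-- what changed: Replaced A's recursion (each Array layer rebuilds the result around a recursive call, and each trailing optional marker is stripped one branch at a time) by a depth-counting loop: rstrip the trailing optional markers at once, count Array layers in a counter, then build the result with one string multiplication and one mapping lookup.
import Mathlib
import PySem

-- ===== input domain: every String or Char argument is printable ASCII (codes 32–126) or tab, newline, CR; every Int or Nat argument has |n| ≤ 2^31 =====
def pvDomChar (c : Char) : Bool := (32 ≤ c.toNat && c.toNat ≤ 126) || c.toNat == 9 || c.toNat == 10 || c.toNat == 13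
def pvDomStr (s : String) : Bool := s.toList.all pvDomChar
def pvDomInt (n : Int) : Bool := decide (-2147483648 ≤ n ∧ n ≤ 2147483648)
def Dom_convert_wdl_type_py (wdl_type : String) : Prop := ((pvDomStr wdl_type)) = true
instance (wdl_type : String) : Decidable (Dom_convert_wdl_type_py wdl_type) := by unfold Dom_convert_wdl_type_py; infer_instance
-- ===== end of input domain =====

-- B replaces A's recursion by a depth-counting loop with rstrip('?') and string repetition (objective: alternative).

-- ===== PORT A =====
-- the type_mapping dict of A, on List Char
def pvMappingA : PySem.Dict (List Char) (List Char) := PySem.Dict.ofList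
  [("String".toList, "string".toList), ("Int".toList, "int".toList),
   ("Float".toList, "float".toList), ("Boolean".toList, "boolean".toList),
   ("File".toList, "File".toList), ("Array".toList, "array".toList),
   ("Map".toList, "record".toList), ("Object".toList, "record".toList)]

-- termination helpers for the slices wdl_type[6:-1] and wdl_type[:-1]
theorem pvSliceInnerLt (cs : List Char) (h : 1 ≤ cs.length) :
    (PySem.List.slice cs (some 6) (some (-1))).length < cs.length := by
  have := PySem.List.length_slice cs 6 (-1)
  simp at this
  have h6 : PySem.List.clampIdx cs.length 6 = min 6 cs.length := by
    exact_mod_cast PySem.List.clampIdx_natCast cs.length 6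
  omega

theorem pvEndsLen {cs p : List Char} (h : PySem.Chars.endswith cs p = true) :
    p.length ≤ cs.length := by
  exact ((PySem.Chars.endswith_iff (s := cs) (p := p)).mp h).length_le

-- A: recursive peeling, literal transliteration
def pvConvA (cs : List Char) : List Char :=
  if PySem.Chars.startswith cs "Array[".toList && PySem.Chars.endswith cs "]".toList then
    "array<".toList ++ pvConvA (PySem.List.slice cs (some 6) (some (-1))) ++ ">".toList
  else if PySem.Chars.endswith cs "?".toList then
    pvConvA (PySem.List.slice cs none (some (-1)))
  else
    pvMappingA.getD cs "string".toList
termination_by cs.length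
decreasing_by
  · exact pvSliceInnerLt cs (by have := pvEndsLen (by simpa using (Bool.and_elim_right ‹_›)); simpa using this)
  · have h1 : 1 ≤ cs.length := by
      have := pvEndsLen ‹_›; simpa using this
    simp [PySem.List.slice]
    omega

def convert_wdl_type_py (wdl_type : String) : String :=
  String.ofList (pvConvA wdl_type.toList)

-- ===== PORT B =====
def pvMappingB : PySem.Dict (List Char) (List Char) := PySem.Dict.ofList
  [("String".toList, "string".toList), ("Int".toList, "int".toList),
   ("Float".toList, "float".toList), ("Boolean".toList, "boolean".toList),
   ("File".toList, "File".toList), ("Array".toList, "array".toList),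
   ("Map".toList, "record".toList), ("Object".toList, "record".toList)]

-- cur.rstrip('?'): remove the trailing run of '?' (exact for Python's str.rstrip with a one-char argument)
def pvRstripQ (cs : List Char) : List Char := (cs.reverse.dropWhile (· == '?')).reverse

theorem pvRstripQ_len_le (cs : List Char) : (pvRstripQ cs).length ≤ cs.length := by
  unfold pvRstripQ
  simpa using List.length_dropWhile_le (· == '?') cs.reverse

-- B's while loop: count Array[...] layers (the counter 'depth'), tracking the stripped core
def pvCoreB (cur : List Char) : Nat × List Char :=
  if PySem.Chars.startswith cur "Array[".toList && PySem.Chars.endswith cur "]".toList then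
    let r := pvCoreB (pvRstripQ (PySem.List.slice cur (some 6) (some (-1))))
    (r.1 + 1, r.2)
  else (0, cur)
termination_by cur.length
decreasing_by
  calc (pvRstripQ (PySem.List.slice cur (some 6) (some (-1)))).length
      ≤ (PySem.List.slice cur (some 6) (some (-1))).length := pvRstripQ_len_le _
    _ < cur.length :=
        pvSliceInnerLt cur (by have := pvEndsLen (by simpa using (Bool.and_elim_right ‹_›)); simpa using this)

-- "array<" * depth + mapping.get(cur, "string") + ">" * depth  (str * int ported as flatten ∘ replicate)
def convert_wdl_type_py_alt (wdl_type : String) : String :=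
  let r := pvCoreB (pvRstripQ wdl_type.toList)
  String.ofList ((List.replicate r.1 "array<".toList).flatten
    ++ pvMappingB.getD r.2 "string".toList
    ++ (List.replicate r.1 ">".toList).flatten)

-- ===== PRECONDITION & SPEC =====
def Spec_convert_wdl_type_py (wdl_type : String) (out : String) : Prop := out = convert_wdl_type_py_alt wdl_type
instance (wdl_type : String) (out : String) : Decidable (Spec_convert_wdl_type_py wdl_type out) := by unfold Spec_convert_wdl_type_py; infer_instance

-- ===== CLAIM (what is proved, stated in full; the proofs are below) =====
def Claim_equal_convert_wdl_type_py : Prop := ∀ (wdl_type : String), Dom_convert_wdl_type_py wdl_type → Spec_convert_wdl_type_py wdl_type (convert_wdl_type_py wdl_type)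

-- ===== LEMMAS AND PROOFS =====
theorem pvMapping_eq : pvMappingB = pvMappingA := by decide

-- endswith on a concat sees only the last character
theorem pvSuffix_single {l : List Char} {c d : Char} : ([d] <:+ l ++ [c]) ↔ d = c := by
  constructor
  · rintro ⟨t, ht⟩
    have := congrArg List.getLast? ht
    simpa using this
  · rintro rfl; exact ⟨l, rfl⟩

theorem pvEndsSingle (l : List Char) (c d : Char) :
    PySem.Chars.endswith (l ++ [c]) [d] = decide (d = c) := by
  by_cases h : d = c
  · rw [h]
    simp only [decide_true]
    exact (PySem.Chars.endswith_iff _ _).mpr (pvSuffix_single.mpr rfl)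
  · simp only [h, decide_false]
    rw [Bool.eq_false_iff]
    intro hcon
    exact h (pvSuffix_single.mp ((PySem.Chars.endswith_iff _ _).mp hcon))

-- A absorbs any trailing run of '?' one at a time; rstrip removes it at once
theorem pvConvA_dropWhileRev (r : List Char) :
    pvConvA ((r.dropWhile (· == '?')).reverse) = pvConvA r.reverse := by
  induction r with
  | nil => rfl
  | cons c t ih =>
    by_cases hc : c = '?'
    · subst hc
      rw [List.dropWhile_cons_of_pos (by simp), ih]
      have h1 : pvConvA (t.reverse ++ ['?']) = pvConvA t.reverse := by
        rw [pvConvA]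
        rw [if_neg (by
          simp only [Bool.and_eq_true, not_and]
          intro _
          show ¬ PySem.Chars.endswith (t.reverse ++ ['?']) "]".toList = true
          simp [show ("]".toList : List Char) = [']'] from rfl, pvEndsSingle])]
        rw [if_pos (by simp [show ("?".toList : List Char) = ['?'] from rfl, pvEndsSingle])]
        rw [PySem.List.slice_to_neg_one]
        simp
      simpa using h1.symm
    · rw [List.dropWhile_cons_of_neg (by simpa using hc)]

theorem pvConvA_rstrip (cs : List Char) : pvConvA (pvRstripQ cs) = pvConvA cs := by
  have := pvConvA_dropWhileRev cs.reverse
  simpa [pvRstripQ] using this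

-- rstrip output never ends in '?'
theorem pvRstripQ_no_q (cs : List Char) :
    PySem.Chars.endswith (pvRstripQ cs) "?".toList = false := by
  unfold pvRstripQ
  rcases h : cs.reverse.dropWhile (· == '?') with _ | ⟨a, t⟩
  · rw [Bool.eq_false_iff]
    intro hcon
    have := (PySem.Chars.endswith_iff _ _).mp (by simpa [h] using hcon)
    simpa using this.length_le
  · have ha : (a == '?') = false := by
      have := List.head_dropWhile_not (· == '?') (l := cs.reverse) (by simp [h])
      simpa [h] using this
    have : (a :: t).reverse = t.reverse ++ [a] := by simp
    rw [this, show ("?".toList : List Char) = ['?'] from rfl, pvEndsSingle]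
    simp only [decide_eq_false_iff_not]
    intro he
    rw [← he] at ha
    simp at ha

-- the depth-counting loop computes exactly A's recursion, for inputs with no trailing '?'
theorem pvCore_spec (c : List Char) :
    PySem.Chars.endswith c "?".toList = false →
    pvConvA c = (List.replicate (pvCoreB c).1 "array<".toList).flatten
      ++ pvMappingA.getD (pvCoreB c).2 "string".toList
      ++ (List.replicate (pvCoreB c).1 ">".toList).flatten := by
  fun_induction pvCoreB c with
  | case1 c hArr r ih =>
    intro _
    rw [pvConvA, if_pos hArr, ← pvConvA_rstrip, ih (pvRstripQ_no_q _)]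
    have hx : (List.replicate (r.1 + 1) "array<".toList).flatten
        = "array<".toList ++ (List.replicate r.1 "array<".toList).flatten := by
      simp [List.replicate_succ]
    have hy : (List.replicate (r.1 + 1) ">".toList).flatten
        = (List.replicate r.1 ">".toList).flatten ++ ">".toList := by
      rw [List.replicate_succ']; simp
    simp only [hx, hy, List.append_assoc]
    rfl
  | case2 c hArr =>
    intro hq
    rw [pvConvA, if_neg (by simpa using hArr), if_neg (by simp only [Bool.not_eq_true]; exact hq)]
    simp

-- ===== VERDICT (by name: the statement is the Claim_ definition above) =====
theorem convert_wdl_type_py_spec : Claim_equal_convert_wdl_type_py := by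
  intro w _
  unfold Spec_convert_wdl_type_py convert_wdl_type_py convert_wdl_type_py_alt
  rw [← pvConvA_rstrip, pvCore_spec _ (pvRstripQ_no_q _), pvMapping_eq]
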